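-- pv_equiv track=rewrite | github.com/LumberjacksIncorperated/ThesisB | test.py | doHorizontalEditingAndReturnNewMatrix
-- ===== SOURCE A (Python) =====
-- from copy import copy, deepcopy
--
-- def closestOneToLeft(row, position):
--     counter = 0
--     position = position - 1
--     while position >= 0 and row[position] == 1:
--         counter = counter + 1
--         position = position - 1
--     return counter
--
-- def closestOneToRight(row, position):
--     counter = 0
--     position = position + 1
--     while position < len(row) and row[position] == 1:
--         counter = counter + 1
--         position = position + 1
--     return counter
--
-- def checkIfShouldBeBlackWithPosition(row, position, GAMMA):
--     left = closestOneToLeft(row, position)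
--     right = closestOneToRight(row, position)
--     if left + right < GAMMA:
--         return True
--     else:
--         return False
--
-- def doHorizontalEditingAndReturnNewMatrix(original_matrix, GAMMA):
--     matrix = deepcopy(original_matrix)
--     for row in matrix:
--         row_counter = 0
--         for pixel in row:
--             if pixel == 1:
--                 checked = checkIfShouldBeBlackWithPosition(row, row_counter, GAMMA)
--                 if checked:
--                     row[row_counter] = 0
--             row_counter = row_counter + 1
--     return matrix
-- ===== SOURCE B (Python) =====
-- def doHorizontalEditingAndReturnNewMatrix(original_matrix, GAMMA):
--     # Single pass per row: zero out every maximal run of 1s of length <= GAMMA.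
--     result = []
--     for row in original_matrix:
--         out = []
--         run = 0
--         for pixel in row:
--             if pixel == 1:
--                 run += 1
--             else:
--                 out.extend([1] * run if run > GAMMA else [0] * run)
--                 out.append(pixel)
--                 run = 0
--         out.extend([1] * run if run > GAMMA else [0] * run)
--         result.append(out)
--     return result
-- ===== Notes on version B (the rewrite author's own statement) =====
-- stated objective: faster
-- what changed: A re-scans left and right from every 1-pixel (and reads partially mutated rows); B makes a single pass per row accumulating the current run of 1s and flushes each maximal run as all-1s or all-0s depending on whether its length exceeds GAMMA.
import Mathlib
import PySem

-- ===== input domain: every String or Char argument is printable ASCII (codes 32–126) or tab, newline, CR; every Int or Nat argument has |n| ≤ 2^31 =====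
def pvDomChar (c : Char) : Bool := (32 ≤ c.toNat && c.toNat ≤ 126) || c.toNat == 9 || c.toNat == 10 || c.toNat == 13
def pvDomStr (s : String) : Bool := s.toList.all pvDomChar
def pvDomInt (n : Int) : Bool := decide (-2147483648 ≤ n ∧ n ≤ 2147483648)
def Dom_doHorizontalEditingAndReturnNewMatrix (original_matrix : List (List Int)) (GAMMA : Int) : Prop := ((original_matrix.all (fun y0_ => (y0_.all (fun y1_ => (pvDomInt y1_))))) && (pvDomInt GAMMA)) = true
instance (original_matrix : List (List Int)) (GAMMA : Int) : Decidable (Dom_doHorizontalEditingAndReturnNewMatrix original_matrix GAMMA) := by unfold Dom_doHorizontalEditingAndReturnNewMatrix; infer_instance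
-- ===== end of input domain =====

-- B replaces A's per-pixel left/right rescans with a single pass per row that zeroes each
-- maximal run of 1s of length <= GAMMA, avoiding the repeated inner scans.
-- A mutates nothing observable (it deepcopies its input); equivalence is about the return value.


-- ===== PORT A =====
-- closestOneToLeft(row, position): counts consecutive 1s at indices position-1, position-2, …
-- (the while-loop guard keeps the index in range, so getD's default is never the value read)
def pvCountLeft (row : List Int) : Nat → Nat
  | 0 => 0
  | p + 1 => if row.getD p 0 = 1 then pvCountLeft row p + 1 else 0

-- the while-loop of closestOneToRight, walking forward over the remaining suffix
def pvCountRightFrom : List Int → Nat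
  | [] => 0
  | x :: xs => if x = 1 then pvCountRightFrom xs + 1 else 0

-- closestOneToRight(row, position) starts at position+1
def pvClosestOneToRight (row : List Int) (position : Nat) : Nat :=
  pvCountRightFrom (row.drop (position + 1))

-- checkIfShouldBeBlackWithPosition
def pvCheck (row : List Int) (position : Nat) (GAMMA : Int) : Bool :=
  decide ((pvCountLeft row position : Int) + (pvClosestOneToRight row position : Int) < GAMMA)

-- the inner 'for pixel in row' loop with row_counter, mutating the row in place
def pvARowGo (GAMMA : Int) (r : List Int) (i : Nat) : Nat → List Int
  | 0 => r
  | fuel + 1 =>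
    let r' := if r.getD i 0 = 1 then (if pvCheck r i GAMMA then r.set i 0 else r) else r
    pvARowGo GAMMA r' (i + 1) fuel

def pvARow (GAMMA : Int) (row : List Int) : List Int := pvARowGo GAMMA row 0 row.length

def doHorizontalEditingAndReturnNewMatrix (original_matrix : List (List Int)) (GAMMA : Int) : List (List Int) :=
  original_matrix.map (pvARow GAMMA)

-- ===== PORT B =====
def pvBFlush (GAMMA : Int) (run : Nat) : List Int :=
  if (run : Int) > GAMMA then List.replicate run 1 else List.replicate run 0

def pvBStep (GAMMA : Int) (st : List Int × Nat) (pixel : Int) : List Int × Nat :=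
  if pixel = 1 then (st.1, st.2 + 1) else (st.1 ++ pvBFlush GAMMA st.2 ++ [pixel], 0)

def pvBRow (GAMMA : Int) (row : List Int) : List Int :=
  let s := row.foldl (pvBStep GAMMA) ([], 0)
  s.1 ++ pvBFlush GAMMA s.2

def doHorizontalEditingAndReturnNewMatrix_alt (original_matrix : List (List Int)) (GAMMA : Int) : List (List Int) :=
  original_matrix.map (pvBRow GAMMA)

-- ===== PRECONDITION & SPEC =====
def Spec_doHorizontalEditingAndReturnNewMatrix (original_matrix : List (List Int)) (GAMMA : Int) (out : List (List Int)) : Prop := out = doHorizontalEditingAndReturnNewMatrix_alt original_matrix GAMMA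
instance (original_matrix : List (List Int)) (GAMMA : Int) (out : List (List Int)) : Decidable (Spec_doHorizontalEditingAndReturnNewMatrix original_matrix GAMMA out) := by unfold Spec_doHorizontalEditingAndReturnNewMatrix; infer_instance

-- ===== CLAIM (what is proved, stated in full; the proofs are below) =====
def Claim_equal_doHorizontalEditingAndReturnNewMatrix : Prop := ∀ (original_matrix : List (List Int)) (GAMMA : Int), Dom_doHorizontalEditingAndReturnNewMatrix original_matrix GAMMA → Spec_doHorizontalEditingAndReturnNewMatrix original_matrix GAMMA (doHorizontalEditingAndReturnNewMatrix original_matrix GAMMA)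

-- ===== LEMMAS AND PROOFS =====

-- A's inner loop, rephrased with the carry c = trailing 1-streak of the already-processed prefix
def pvA1 (GAMMA : Int) (c : Nat) : List Int → List Int
  | [] => []
  | x :: rest =>
    if x = 1 then
      if (c : Int) + (pvCountRightFrom rest : Int) < GAMMA then
        (0 : Int) :: pvA1 GAMMA 0 rest
      else
        (1 : Int) :: pvA1 GAMMA (c + 1) rest
    else x :: pvA1 GAMMA 0 rest

-- B's loop, rephrased with the pending-run counter
def pvB1 (GAMMA : Int) (run : Nat) : List Int → List Int
  | [] => pvBFlush GAMMA run
  | x :: rest => if x = 1 then pvB1 GAMMA (run + 1) rest else pvBFlush GAMMA run ++ x :: pvB1 GAMMA 0 rest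

theorem pvCountLeft_append (done t : List Int) :
    pvCountLeft (done ++ t) done.length = pvCountRightFrom done.reverse := by
  induction done using List.reverseRecOn generalizing t with
  | nil => simp [pvCountLeft, pvCountRightFrom]
  | append_singleton d a ih =>
    have h1 : (d ++ [a]) ++ t = d ++ a :: t := by simp
    have hlen : (d ++ [a]).length = d.length + 1 := by simp
    have hg : (d ++ a :: t).getD d.length 0 = a := by
      simp [List.getD]
    rw [h1, hlen]
    by_cases ha : a = 1
    · subst ha
      simp [pvCountLeft, ih ((1 : Int) :: t), List.reverse_append, pvCountRightFrom]
    · simp [pvCountLeft, ha, List.reverse_append, pvCountRightFrom]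

theorem pvCR_snoc (done : List Int) (a : Int) :
    pvCountRightFrom ((done ++ [a]).reverse) =
      if a = 1 then pvCountRightFrom done.reverse + 1 else 0 := by
  by_cases ha : a = 1 <;> simp [List.reverse_append, pvCountRightFrom, ha]

theorem pvARowGo_zip (GAMMA : Int) (todo done : List Int) :
    pvARowGo GAMMA (done ++ todo) done.length todo.length =
      done ++ pvA1 GAMMA (pvCountRightFrom done.reverse) todo := by
  induction todo generalizing done with
  | nil => simp [pvARowGo, pvA1]
  | cons x rest ih =>
    have hg : (done ++ x :: rest).getD done.length 0 = x := by
      simp [List.getD]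
    have hdrop : (done ++ x :: rest).drop (done.length + 1) = rest := by
      have h : done ++ x :: rest = (done ++ [x]) ++ rest := by simp
      rw [h]
      have hl : done.length + 1 = (done ++ [x]).length := by simp
      rw [hl, List.drop_left]
    have hcl : pvCountLeft (done ++ x :: rest) done.length = pvCountRightFrom done.reverse :=
      pvCountLeft_append done (x :: rest)
    show pvARowGo GAMMA (done ++ x :: rest) done.length (rest.length + 1) = _
    by_cases hx : x = 1
    · subst hx
      by_cases hc : (pvCountRightFrom done.reverse : Int) + (pvCountRightFrom rest : Int) < GAMMA
      · have hchk : pvCheck (done ++ 1 :: rest) done.length GAMMA = true := by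
          simp [pvCheck, pvClosestOneToRight, hcl, hdrop, hc]
        have hset : (done ++ (1 : Int) :: rest).set done.length 0 = done ++ 0 :: rest := by
          simp
        calc pvARowGo GAMMA (done ++ 1 :: rest) done.length (rest.length + 1)
            = pvARowGo GAMMA (done ++ 0 :: rest) (done.length + 1) rest.length := by
              simp only [pvARowGo]
              rw [if_pos hg, if_pos hchk, hset]
          _ = pvARowGo GAMMA ((done ++ [0]) ++ rest) ((done ++ [(0 : Int)]).length) rest.length := by
              simp
          _ = (done ++ [0]) ++ pvA1 GAMMA (pvCountRightFrom ((done ++ [(0 : Int)]).reverse)) rest :=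
              ih (done ++ [0])
          _ = done ++ pvA1 GAMMA (pvCountRightFrom done.reverse) (1 :: rest) := by
              rw [pvCR_snoc]
              simp [pvA1, hc]
      · have hchk : pvCheck (done ++ 1 :: rest) done.length GAMMA = false := by
          simp [pvCheck, pvClosestOneToRight, hcl, hdrop, hc]
        calc pvARowGo GAMMA (done ++ 1 :: rest) done.length (rest.length + 1)
            = pvARowGo GAMMA (done ++ 1 :: rest) (done.length + 1) rest.length := by
              simp only [pvARowGo]
              rw [if_pos hg, if_neg (by simp [hchk])]
          _ = pvARowGo GAMMA ((done ++ [1]) ++ rest) ((done ++ [(1 : Int)]).length) rest.length := by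
              simp
          _ = (done ++ [1]) ++ pvA1 GAMMA (pvCountRightFrom ((done ++ [(1 : Int)]).reverse)) rest :=
              ih (done ++ [1])
          _ = done ++ pvA1 GAMMA (pvCountRightFrom done.reverse) (1 :: rest) := by
              rw [pvCR_snoc]
              simp [pvA1, hc]
    · calc pvARowGo GAMMA (done ++ x :: rest) done.length (rest.length + 1)
          = pvARowGo GAMMA (done ++ x :: rest) (done.length + 1) rest.length := by
            simp only [pvARowGo]
            rw [if_neg (show ¬ (done ++ x :: rest).getD done.length 0 = 1 by rw [hg]; exact hx)]
        _ = pvARowGo GAMMA ((done ++ [x]) ++ rest) ((done ++ [x]).length) rest.length := by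
            simp
        _ = (done ++ [x]) ++ pvA1 GAMMA (pvCountRightFrom ((done ++ [x]).reverse)) rest :=
            ih (done ++ [x])
        _ = done ++ pvA1 GAMMA (pvCountRightFrom done.reverse) (x :: rest) := by
            rw [pvCR_snoc]
            simp [pvA1, hx]

theorem pvARow_eq_A1 (GAMMA : Int) (row : List Int) :
    pvARow GAMMA row = pvA1 GAMMA 0 row := by
  have := pvARowGo_zip GAMMA row []
  simpa [pvARow, pvCountRightFrom] using this

-- decomposition of a list into its leading 1-run and the rest
theorem pvDecomp (l : List Int) :
    List.replicate (pvCountRightFrom l) 1 ++ l.dropWhile (fun a => a == 1) = l := by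
  induction l with
  | nil => simp [pvCountRightFrom]
  | cons x xs ih =>
    by_cases hx : x = 1
    · subst hx; simp [pvCountRightFrom, List.dropWhile, List.replicate_succ, ih]
    · have hb : (x == 1) = false := by simp [hx]
      simp [pvCountRightFrom, List.dropWhile, hx, hb]

theorem pvCR_dropWhile (l : List Int) :
    pvCountRightFrom (l.dropWhile (fun a => a == 1)) = 0 := by
  induction l with
  | nil => simp [pvCountRightFrom]
  | cons x xs ih =>
    by_cases hx : x = 1
    · subst hx; simpa [List.dropWhile] using ih
    · have hb : (x == 1) = false := by simp [hx]
      simp [List.dropWhile, hb, hx, pvCountRightFrom]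

theorem pvA1_run (GAMMA : Int) (s : Nat) (c : Nat) (rest : List Int)
    (h : pvCountRightFrom rest = 0) :
    pvA1 GAMMA c (List.replicate s 1 ++ rest) =
      (if ((c : Int) + (s : Int) > GAMMA) then List.replicate s (1 : Int) else List.replicate s 0)
        ++ pvA1 GAMMA 0 rest := by
  induction s generalizing c with
  | zero =>
    cases rest with
    | nil => simp [pvA1]
    | cons y ys =>
      have hy : ¬ y = 1 := by
        intro hy; subst hy; simp [pvCountRightFrom] at h
      simp [pvA1, hy]
  | succ s ih =>
    have hcr : pvCountRightFrom (List.replicate s 1 ++ rest) = s := by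
      clear ih
      induction s with
      | zero => simpa using h
      | succ s ih2 => simpa [List.replicate_succ, pvCountRightFrom] using ih2
    simp only [List.replicate_succ, List.cons_append, pvA1, hcr]
    by_cases hc : (c : Int) + (s : Int) < GAMMA
    · rw [if_pos hc, ih 0]
      have h1 : ¬ GAMMA < (s : Int) := by omega
      have h2 : ¬ GAMMA < (c : Int) + ((s : Int) + 1) := by omega
      simp [h1, h2]
    · rw [if_neg hc, ih (c + 1)]
      have h1 : GAMMA < (c : Int) + 1 + (s : Int) := by omega
      have h2 : GAMMA < (c : Int) + ((s : Int) + 1) := by omega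
      simp [h1, h2]

theorem pvBRow_eq_B1_aux (GAMMA : Int) (todo : List Int) (out : List Int) (run : Nat) :
    (todo.foldl (pvBStep GAMMA) (out, run)).1 ++ pvBFlush GAMMA (todo.foldl (pvBStep GAMMA) (out, run)).2
      = out ++ pvB1 GAMMA run todo := by
  induction todo generalizing out run with
  | nil => simp [pvB1]
  | cons x rest ih =>
    by_cases hx : x = 1
    · subst hx
      simpa [List.foldl, pvBStep, pvB1] using ih out (run + 1)
    · simp only [List.foldl, pvBStep, if_neg hx]
      rw [ih]
      simp [pvB1, hx]

theorem pvBRow_eq_B1 (GAMMA : Int) (row : List Int) :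
    pvBRow GAMMA row = pvB1 GAMMA 0 row := by
  simpa [pvBRow] using pvBRow_eq_B1_aux GAMMA row [] 0

theorem pvB1_run (GAMMA : Int) (s run : Nat) (rest : List Int) :
    pvB1 GAMMA run (List.replicate s 1 ++ rest) = pvB1 GAMMA (run + s) rest := by
  induction s generalizing run with
  | zero => simp
  | succ s ih =>
    simp only [List.replicate_succ, List.cons_append, pvB1]
    rw [ih]
    have h : run + 1 + s = run + (s + 1) := by omega
    rw [h]
    simp

theorem pvBFlush_zero (GAMMA : Int) : pvBFlush GAMMA 0 = [] := by
  simp [pvBFlush]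

theorem pvB1_flush (GAMMA : Int) (run : Nat) (rest : List Int)
    (h : pvCountRightFrom rest = 0) :
    pvB1 GAMMA run rest = pvBFlush GAMMA run ++ pvB1 GAMMA 0 rest := by
  cases rest with
  | nil => simp [pvB1, pvBFlush_zero]
  | cons y ys =>
    have hy : ¬ y = 1 := by
      intro hy; subst hy; simp [pvCountRightFrom] at h
    simp [pvB1, hy, pvBFlush_zero]

theorem pvA1_eq_B1 (GAMMA : Int) (row : List Int) :
    pvA1 GAMMA 0 row = pvB1 GAMMA 0 row := by
  induction hn : row.length using Nat.strong_induction_on generalizing row with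
  | _ n ih =>
    cases row with
    | nil => simp [pvA1, pvB1, pvBFlush]
    | cons x xs =>
      by_cases hx : x = 1
      · subst hx
        set s := pvCountRightFrom ((1 : Int) :: xs) with hs
        set d := ((1 : Int) :: xs).dropWhile (fun a => a == 1) with hd
        have hdec : List.replicate s 1 ++ d = (1 : Int) :: xs := pvDecomp _
        have hcrd : pvCountRightFrom d = 0 := pvCR_dropWhile _
        have hs1 : 1 ≤ s := by
          rw [hs]; simp [pvCountRightFrom]
        have hdlen : d.length < n := by
          have hlen1 : s + d.length = xs.length + 1 := by
            have := congrArg List.length hdec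
            simpa using this
          have hn' : xs.length + 1 = n := by simpa using hn
          omega
        have ihd := ih d.length hdlen d rfl
        calc pvA1 GAMMA 0 ((1 : Int) :: xs)
            = pvA1 GAMMA 0 (List.replicate s 1 ++ d) := by rw [hdec]
          _ = (if ((0 : Int) + (s : Int) > GAMMA) then List.replicate s (1 : Int)
                else List.replicate s 0) ++ pvA1 GAMMA 0 d := pvA1_run GAMMA s 0 d hcrd
          _ = pvBFlush GAMMA s ++ pvB1 GAMMA 0 d := by
              rw [ihd]; congr 1; simp [pvBFlush]
          _ = pvB1 GAMMA s d := (pvB1_flush GAMMA s d hcrd).symm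
          _ = pvB1 GAMMA (0 + s) d := by rw [Nat.zero_add]
          _ = pvB1 GAMMA 0 (List.replicate s 1 ++ d) := (pvB1_run GAMMA s 0 d).symm
          _ = pvB1 GAMMA 0 ((1 : Int) :: xs) := by rw [hdec]
      · have hxl : xs.length < n := by simp at hn; omega
        have := ih xs.length hxl xs rfl
        simp [pvA1, pvB1, hx, this, pvBFlush_zero]

theorem pvARow_eq_BRow (GAMMA : Int) (row : List Int) :
    pvARow GAMMA row = pvBRow GAMMA row := by
  rw [pvARow_eq_A1, pvBRow_eq_B1, pvA1_eq_B1]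

-- ===== VERDICT (by name: the statement is the Claim_ definition above) =====
theorem doHorizontalEditingAndReturnNewMatrix_spec : Claim_equal_doHorizontalEditingAndReturnNewMatrix := by
  intro original_matrix GAMMA _
  unfold Spec_doHorizontalEditingAndReturnNewMatrix doHorizontalEditingAndReturnNewMatrix doHorizontalEditingAndReturnNewMatrix_alt
  exact List.map_congr_left (fun row _ => pvARow_eq_BRow GAMMA row)
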